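-- pv_equiv track=rewrite | github.com/DartFrogTek/PCIe-PCI-ISA | AT24C02_Programmer/IT8888F_ConfigTool.py | configure_bios_segments
-- ===== SOURCE A (Python) =====
-- from typing import Dict, List, Tuple
--
-- REGISTERS = {
--     # Device/Vendor ID (Read-Only)
--     "DEV_VENDOR_ID": 0x00,
--     # Status/Command
--     "STATUS_CMD": 0x04,
--     # Class Code/Revision ID (Read-Only)
--     "CLASS_REVISION": 0x08,
--     # Header Type/MLT/Cache Line Size
--     "HEADER_MLT_CLS": 0x0C,
--     # Subsystem Device/Vendor ID
--     "SUBSYS_ID": 0x2C,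
--     # DDMA Slave Channels 0-1
--     "DDMA_CH0_CH1": 0x40,
--     # DDMA Slave Channels 2-3
--     "DDMA_CH2_CH3": 0x44,
--     # DDMA Slave Channel 5/DMA Type-F/PPD
--     "DDMA_CH5_TYPE_F_PPD": 0x48,
--     # DDMA Slave Channels 6-7
--     "DDMA_CH6_CH7": 0x4C,
--     # ROM/ISA Spaces and Timing Control
--     "ISA_SPACES_TIMING": 0x50,
--     # Retry/Discard Timers, Misc Control
--     "TIMERS_MISC_CTRL": 0x54,
--     # Positively Decoded I/O Spaces 0-5
--     "IO_SPACE_0": 0x58,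
--     "IO_SPACE_1": 0x5C,
--     "IO_SPACE_2": 0x60,
--     "IO_SPACE_3": 0x64,
--     "IO_SPACE_4": 0x68,
--     "IO_SPACE_5": 0x6C,
--     # Positively Decoded Memory Spaces 0-3
--     "MEM_SPACE_0": 0x70,
--     "MEM_SPACE_1": 0x74,
--     "MEM_SPACE_2": 0x78,
--     "MEM_SPACE_3": 0x7C,
-- }
--
-- DEFAULT_CONFIG = {
--     # Enable subtractive decode and delayed transaction
--     "ISA_SPACES_TIMING": 0x00000003,
--     # Enable DDMA-Concurrent, ISA Bus Refresh, Force PCI clock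
--     "TIMERS_MISC_CTRL": 0x8C000000,
-- }
--
-- def configure_bios_segments(segments: List[str]) -> Tuple[int, int]:
--     """Configure ROM decoding for BIOS segments"""
--     # Start with current value or default
--     value = DEFAULT_CONFIG.get("ISA_SPACES_TIMING", 0)
--
--     # Extract the upper byte for ROM decoding
--     rom_decode = (value >> 24) & 0xFF
--
--     # Set the write protect bit by default
--     rom_decode |= (1 << 0)  # Bit 24 of the register
--
--     if "all" in segments:
--         segments = ["C", "D", "E", "F"]
--
--     for segment in segments:
--         if segment == "C":
--             # Enable C0000-C7FFF and C8000-CFFFF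
--             rom_decode |= (1 << 1) | (1 << 2)
--         elif segment == "D":
--             # Enable D0000-DFFFF
--             rom_decode |= (1 << 3)
--         elif segment == "E":
--             # Enable E0000-EFFFF
--             rom_decode |= (1 << 4)
--         elif segment == "F":
--             # For F segment, we need to set bit 3 in the second byte
--             # This will positively decode F segment with fast DEVSEL#
--             value |= (1 << 3)
--
--     # Update the ROM decode bits
--     value = (value & 0x00FFFFFF) | (rom_decode << 24)
--
--     return REGISTERS["ISA_SPACES_TIMING"], value
-- ===== SOURCE B (Python) =====
-- # B: instead of scanning the input with an if/elif chain, iterate over the fixed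
-- # segment->mask table and the 'F' flag with membership tests on the effective list.
--
-- ISA_SPACES_TIMING = 0x50          # REGISTERS["ISA_SPACES_TIMING"]
-- DEFAULT_VALUE = 0x00000003        # DEFAULT_CONFIG["ISA_SPACES_TIMING"]
-- SEGMENT_MASKS = (("C", 0b00000110), ("D", 0b00001000), ("E", 0b00010000))
--
-- def configure_bios_segments(segments):
--     eff = ("C", "D", "E", "F") if "all" in segments else segments
--     rom_decode = ((DEFAULT_VALUE >> 24) & 0xFF) | 0x01   # write-protect bit
--     for seg, mask in SEGMENT_MASKS:
--         if seg in eff: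
--             rom_decode |= mask
--     value = DEFAULT_VALUE | (0x08 if "F" in eff else 0)
--     return ISA_SPACES_TIMING, (value & 0x00FFFFFF) | (rom_decode << 24)
-- ===== Notes on version B (the rewrite author's own statement) =====
-- stated objective: idiomatic
-- what changed: A scans the input list with an if/elif chain over segment names; B inverts the traversal axis: it iterates over a fixed segment->mask table (and a separate 'F' flag) using membership tests on the effective segment list, OR-ing each mask at most once.
import Mathlib
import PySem

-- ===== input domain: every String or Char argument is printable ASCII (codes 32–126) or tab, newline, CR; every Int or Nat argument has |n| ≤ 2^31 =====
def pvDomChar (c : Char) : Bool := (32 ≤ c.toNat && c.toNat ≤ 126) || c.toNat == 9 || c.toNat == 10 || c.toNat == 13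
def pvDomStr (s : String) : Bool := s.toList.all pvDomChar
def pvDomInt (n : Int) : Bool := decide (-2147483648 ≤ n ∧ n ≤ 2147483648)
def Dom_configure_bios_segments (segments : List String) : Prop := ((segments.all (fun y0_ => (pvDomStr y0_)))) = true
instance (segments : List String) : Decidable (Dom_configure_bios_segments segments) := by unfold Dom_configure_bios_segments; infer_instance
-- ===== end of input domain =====

-- B replaces A's if/elif scan of the input list by membership tests against a fixed
-- segment->mask table (idiomatic decomposition; same cost, no speed claim).


-- ===== PORT A =====
def REGISTERS : PySem.Dict String Int :=
  PySem.Dict.ofList [("DEV_VENDOR_ID", 0x00), ("STATUS_CMD", 0x04), ("CLASS_REVISION", 0x08),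
   ("HEADER_MLT_CLS", 0x0C), ("SUBSYS_ID", 0x2C), ("DDMA_CH0_CH1", 0x40),
   ("DDMA_CH2_CH3", 0x44), ("DDMA_CH5_TYPE_F_PPD", 0x48), ("DDMA_CH6_CH7", 0x4C),
   ("ISA_SPACES_TIMING", 0x50), ("TIMERS_MISC_CTRL", 0x54),
   ("IO_SPACE_0", 0x58), ("IO_SPACE_1", 0x5C), ("IO_SPACE_2", 0x60),
   ("IO_SPACE_3", 0x64), ("IO_SPACE_4", 0x68), ("IO_SPACE_5", 0x6C),
   ("MEM_SPACE_0", 0x70), ("MEM_SPACE_1", 0x74), ("MEM_SPACE_2", 0x78),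
   ("MEM_SPACE_3", 0x7C)]

def DEFAULT_CONFIG : PySem.Dict String Int :=
  PySem.Dict.ofList [("ISA_SPACES_TIMING", 0x00000003), ("TIMERS_MISC_CTRL", 0x8C000000)]

-- one step of A's if/elif chain over the state (rom_decode, value)
def pvALoop (st : Int × Int) (segment : String) : Int × Int :=
  if segment == "C" then (PySem.Int.bor st.1 (PySem.Int.bor (1 <<< 1) (1 <<< 2)), st.2)
  else if segment == "D" then (PySem.Int.bor st.1 (1 <<< 3), st.2)
  else if segment == "E" then (PySem.Int.bor st.1 (1 <<< 4), st.2)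
  else if segment == "F" then (st.1, PySem.Int.bor st.2 (1 <<< 3))
  else st

def configure_bios_segments (segments : List String) : Int × Int :=
  let value : Int := PySem.Dict.getD DEFAULT_CONFIG "ISA_SPACES_TIMING" 0
  let rom_decode : Int := PySem.Int.band (value >>> 24) 0xFF
  let rom_decode := PySem.Int.bor rom_decode (1 <<< 0)
  let segments := if segments.contains "all" then ["C", "D", "E", "F"] else segments
  let st := segments.foldl pvALoop (rom_decode, value)
  -- REGISTERS["ISA_SPACES_TIMING"]: the key is present in the literal dict, so getD is exact
  (PySem.Dict.getD REGISTERS "ISA_SPACES_TIMING" 0,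
   PySem.Int.bor (PySem.Int.band st.2 0x00FFFFFF) (st.1 <<< 24))

-- ===== PORT B =====
def ISA_SPACES_TIMING : Int := 0x50
def DEFAULT_VALUE : Int := 0x00000003
def SEGMENT_MASKS : List (String × Int) := [("C", 6), ("D", 8), ("E", 16)]

def configure_bios_segments_alt (segments : List String) : Int × Int :=
  let eff := if segments.contains "all" then ["C", "D", "E", "F"] else segments
  let rom_decode : Int := PySem.Int.bor (PySem.Int.band (DEFAULT_VALUE >>> 24) 0xFF) 0x01
  let rom_decode := SEGMENT_MASKS.foldl
    (fun rd p => if eff.contains p.1 then PySem.Int.bor rd p.2 else rd) rom_decode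
  let value : Int := PySem.Int.bor DEFAULT_VALUE (if eff.contains "F" then 0x08 else 0)
  (ISA_SPACES_TIMING, PySem.Int.bor (PySem.Int.band value 0x00FFFFFF) (rom_decode <<< 24))

-- ===== PRECONDITION & SPEC =====
def Spec_configure_bios_segments (segments : List String) (out : Int × Int) : Prop := out = configure_bios_segments_alt segments
instance (segments : List String) (out : Int × Int) : Decidable (Spec_configure_bios_segments segments out) := by unfold Spec_configure_bios_segments; infer_instance

-- ===== CLAIM (what is proved, stated in full; the proofs are below) =====
def Claim_equal_configure_bios_segments : Prop := ∀ (segments : List String), Dom_configure_bios_segments segments → Spec_configure_bios_segments segments (configure_bios_segments segments)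

-- ===== LEMMAS AND PROOFS =====

-- A's fold state as a function of which of the four segments have been seen
def pvState (c d e f : Bool) : Int × Int :=
  (PySem.Int.bor (PySem.Int.bor (PySem.Int.bor 1 (if c then 6 else 0)) (if d then 8 else 0))
     (if e then 16 else 0),
   PySem.Int.bor 3 (if f then 8 else 0))

theorem pvALoop_state (c d e f : Bool) (s : String) :
    pvALoop (pvState c d e f) s
      = pvState (c || (s == "C")) (d || (s == "D")) (e || (s == "E")) (f || (s == "F")) := by
  by_cases h1 : s = "C"
  · subst h1; cases c <;> cases d <;> cases e <;> cases f <;> decide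
  · by_cases h2 : s = "D"
    · subst h2; cases c <;> cases d <;> cases e <;> cases f <;> decide
    · by_cases h3 : s = "E"
      · subst h3; cases c <;> cases d <;> cases e <;> cases f <;> decide
      · by_cases h4 : s = "F"
        · subst h4; cases c <;> cases d <;> cases e <;> cases f <;> decide
        · simp [pvALoop, pvState, h1, h2, h3, h4]

theorem pvALoop_foldl (segs : List String) (c d e f : Bool) :
    segs.foldl pvALoop (pvState c d e f)
      = pvState (c || segs.contains "C") (d || segs.contains "D")
          (e || segs.contains "E") (f || segs.contains "F") := by
  induction segs generalizing c d e f with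
  | nil => simp
  | cons s t ih =>
    simp only [List.foldl_cons, pvALoop_state, ih, List.contains_cons]
    simp [Bool.or_assoc, BEq.comm]

theorem configure_eq (segments : List String) :
    configure_bios_segments segments = configure_bios_segments_alt segments := by
  unfold configure_bios_segments configure_bios_segments_alt
  by_cases hall : segments.contains "all"
  · simp only [hall, if_true]; decide
  · simp only [hall, if_false, Bool.false_eq_true]
    rw [show (PySem.Dict.getD DEFAULT_CONFIG "ISA_SPACES_TIMING" 0) = (3 : Int) from by decide]
    have := pvALoop_foldl segments false false false false
    simp only [Bool.false_or] at this
    rw [show ((PySem.Int.bor (PySem.Int.band ((3:Int) >>> 24) 0xFF) (1 <<< 0)), (3:Int))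
          = pvState false false false false from by decide, this]
    by_cases hC : "C" ∈ segments <;> by_cases hD : "D" ∈ segments <;>
      by_cases hE : "E" ∈ segments <;> by_cases hF : "F" ∈ segments <;>
      simp [pvState, SEGMENT_MASKS, List.foldl, ISA_SPACES_TIMING, DEFAULT_VALUE,
        hC, hD, hE, hF] <;> decide

-- ===== VERDICT (by name: the statement is the Claim_ definition above) =====
theorem configure_bios_segments_spec : Claim_equal_configure_bios_segments := by
  intro segments _
  unfold Spec_configure_bios_segments
  exact configure_eq segments
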